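-- pv_equiv track=rewrite | github.com/Mighty0r0n/GapCSequence | main.py | sequenceGenerator
-- ===== SOURCE A (Python) =====
-- def sequenceGenerator(iterations):
--
--     templateSequence = "ATGCG"
--
--     templateSequenceList = []
--     for i in range(iterations):
--         if i == 0:
--             templateSequenceList.append(templateSequence)
--         else:
--             templateSequenceList.append("{seq}ATGCG".format(seq=templateSequenceList[i-1]))
--
--     return templateSequenceList
-- ===== SOURCE B (Python) =====
-- def sequenceGenerator(iterations):
--     full = "ATGCG" * iterations
--     return [full[:5 * (i + 1)] for i in range(iterations)]
-- ===== Notes on version B (the rewrite author's own statement) =====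
-- stated objective: simpler
-- what changed: B builds the full repeated string once ('ATGCG' * iterations) and returns its prefix slices full[:5*(i+1)], replacing A's loop that accumulates each element from the previous list entry with a first-iteration special case.
import Mathlib
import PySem

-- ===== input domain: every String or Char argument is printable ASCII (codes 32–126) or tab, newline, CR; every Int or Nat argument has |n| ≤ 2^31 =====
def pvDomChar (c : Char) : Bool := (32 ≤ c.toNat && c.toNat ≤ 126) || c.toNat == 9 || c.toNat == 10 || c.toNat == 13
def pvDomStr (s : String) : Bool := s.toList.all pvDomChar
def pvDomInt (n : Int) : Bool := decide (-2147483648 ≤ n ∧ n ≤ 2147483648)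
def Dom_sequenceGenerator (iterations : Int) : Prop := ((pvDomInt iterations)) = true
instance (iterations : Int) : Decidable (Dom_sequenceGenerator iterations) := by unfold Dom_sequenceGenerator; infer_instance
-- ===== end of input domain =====

-- B builds the full string once and returns its prefix slices instead of A's running
-- accumulation with a first-iteration special case (objective: simpler); return values proved equal.

-- ===== PORT A =====
-- Literal port of A's loop: fold over range(iterations); templateSequenceList[i-1] is
-- always in range in Python, so the `.getD ""` default is never taken (exact).
def sequenceGenerator (iterations : Int) : List String :=
  (PySem.List.pyRange 0 iterations 1).foldl
    (fun acc i =>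
      if i = 0 then acc ++ ["ATGCG"]
      else acc ++ [((PySem.List.pyGet? acc (i - 1)).getD "") ++ "ATGCG"])
    []

-- ===== PORT B =====
-- Literal port of Source B: full = "ATGCG" * iterations, then prefix slices full[:5*(i+1)].
def sequenceGenerator_alt (iterations : Int) : List String :=
  let full : List Char := PySem.List.pyRepeat "ATGCG".toList iterations
  (PySem.List.pyRange 0 iterations 1).map
    (fun i => String.ofList (PySem.List.slice full none (some (5 * (i + 1)))))

-- ===== PRECONDITION & SPEC =====
def Spec_sequenceGenerator (iterations : Int) (out : List String) : Prop := out = sequenceGenerator_alt iterations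
instance (iterations : Int) (out : List String) : Decidable (Spec_sequenceGenerator iterations out) := by unfold Spec_sequenceGenerator; infer_instance

-- ===== CLAIM (what is proved, stated in full; the proofs are below) =====
def Claim_equal_sequenceGenerator : Prop := ∀ (iterations : Int), Dom_sequenceGenerator iterations → Spec_sequenceGenerator iterations (sequenceGenerator iterations)

-- ===== LEMMAS AND PROOFS =====

-- the canonical value: k-th element is "ATGCG" repeated (k+1) times
def pvUnit : List Char := "ATGCG".toList

def pvGen (n : Nat) : List String :=
  (List.range n).map (fun k => String.ofList ((List.replicate (k + 1) pvUnit).flatten))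

lemma pvGen_get (n k : Nat) (hk : k < n) :
    (pvGen n)[k]? = some (String.ofList ((List.replicate (k + 1) pvUnit).flatten)) := by
  simp [pvGen, hk]

-- A's fold over range(0, n) produces pvGen n
lemma pvA_fold (n : Nat) :
    (PySem.List.pyRange 0 (n : Int) 1).foldl
      (fun acc i =>
        if i = 0 then acc ++ ["ATGCG"]
        else acc ++ [((PySem.List.pyGet? acc (i - 1)).getD "") ++ "ATGCG"])
      [] = pvGen n := by
  induction n with
  | zero => simp [PySem.List.pyRange_one_eq_nil, pvGen]
  | succ m ih =>
      rw [show ((m + 1 : Nat) : Int) = (m : Int) + 1 by push_cast; ring,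
        PySem.List.pyRange_one_succ_right (by positivity), List.foldl_append, ih]
      cases m with
      | zero => simp [pvGen, pvUnit]
      | succ j =>
          have hne : ((j + 1 : Nat) : Int) ≠ 0 := by positivity
          simp only [List.foldl_cons, List.foldl_nil, hne]
          have hidx : ((j + 1 : Nat) : Int) - 1 = ((j : Nat) : Int) := by push_cast; ring
          rw [if_neg (by exact not_false), hidx, PySem.List.pyGet?_natCast, pvGen_get (j + 1) j (by omega)]
          have hcat : (String.ofList ((List.replicate (j + 1) pvUnit).flatten)) ++ "ATGCG"
              = String.ofList ((List.replicate (j + 2) pvUnit).flatten) := by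
            have h2 : (List.replicate (j + 2) pvUnit).flatten
                = (List.replicate (j + 1) pvUnit).flatten ++ pvUnit := by
              rw [List.replicate_succ' (n := j + 1)]; simp
            rw [h2, ← String.ofList_append]
            rfl
          rw [Option.getD_some, hcat]
          simp [pvGen, List.range_succ (n := j + 1)]

-- taking 5*k chars from n ≥ k copies of the 5-char unit gives k copies
lemma pvTake_flatten (k : Nat) : ∀ n : Nat, k ≤ n →
    ((List.replicate n pvUnit).flatten).take (5 * k) = (List.replicate k pvUnit).flatten := by
  induction k with
  | zero => intro n _; simp
  | succ j ih =>
      intro n hn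
      cases n with
      | zero => omega
      | succ m =>
          rw [List.replicate_succ (n := m), List.flatten_cons]
          have h5 : 5 * (j + 1) = pvUnit.length + 5 * j := by simp [pvUnit]; omega
          rw [h5, List.take_append, List.take_of_length_le (by simp [pvUnit]),
            Nat.add_sub_cancel_left (n := pvUnit.length), ih m (by omega)]
          simp [List.replicate_succ]

-- B equals pvGen n for nonnegative casts
lemma pvB_eq (n : Nat) : sequenceGenerator_alt (n : Int) = pvGen n := by
  unfold sequenceGenerator_alt pvGen
  rw [PySem.List.pyRange_one (a := 0) (b := (n : Int))]
  simp only [zero_add, Int.sub_zero, Int.toNat_natCast, List.map_map]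
  apply List.map_congr_left
  intro k hk
  simp only [Function.comp]
  have h5 : (5 : Int) * ((k : Int) + 1) = ((5 * (k + 1) : Nat) : Int) := by push_cast; ring
  rw [h5, PySem.List.slice_to_natCast]
  congr 1
  simp only [PySem.List.pyRepeat]
  exact pvTake_flatten (k + 1) n (by simp at hk; omega)

lemma pv_nonpos (m : Int) (hm : m ≤ 0) :
    sequenceGenerator m = sequenceGenerator_alt m := by
  unfold sequenceGenerator sequenceGenerator_alt
  rw [PySem.List.pyRange_one_eq_nil hm]
  simp

-- ===== VERDICT (by name: the statement is the Claim_ definition above) =====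
theorem sequenceGenerator_spec : Claim_equal_sequenceGenerator := by
  intro m _
  unfold Spec_sequenceGenerator
  by_cases hm : m ≤ 0
  · exact pv_nonpos m hm
  · lift m to Nat using (by omega : (0 : Int) ≤ m)
    unfold sequenceGenerator
    rw [pvA_fold m, pvB_eq m]
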